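-- pv_equiv track=rewrite | github.com/slaymaker1907/baeuler | music_server/musicapi/views.py | group_sizes
-- ===== SOURCE A (Python) =====
-- def group_sizes(grouping):
--     result = [1]
--     for grouped in grouping:
--         if grouped:
--             result[-1] += 1
--         else:
--             result.append(1)
--     return result
-- ===== SOURCE B (Python) =====
-- def group_sizes(grouping):
--     bounds = [-1] + [i for i, g in enumerate(grouping) if not g] + [len(grouping)]
--     return [b - a for a, b in zip(bounds, bounds[1:])]
-- ===== Notes on version B (the rewrite author's own statement) =====
-- stated objective: alternative
-- what changed: Instead of growing a result list and mutating its last element per item, B collects the indices of the False delimiters (with sentinels -1 and len) and returns the consecutive differences of that boundary list.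
import Mathlib
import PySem

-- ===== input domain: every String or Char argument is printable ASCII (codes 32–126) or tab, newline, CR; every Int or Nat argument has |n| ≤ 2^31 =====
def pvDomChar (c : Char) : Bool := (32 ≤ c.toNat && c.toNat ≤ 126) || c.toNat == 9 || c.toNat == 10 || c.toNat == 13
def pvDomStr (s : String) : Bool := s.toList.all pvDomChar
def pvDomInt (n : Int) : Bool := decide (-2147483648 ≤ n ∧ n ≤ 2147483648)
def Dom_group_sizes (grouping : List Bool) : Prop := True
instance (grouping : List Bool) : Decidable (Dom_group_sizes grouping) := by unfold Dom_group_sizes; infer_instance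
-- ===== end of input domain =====

-- B replaces A's grow-and-mutate-last loop by collecting the False-delimiter indices
-- (with sentinels -1 and len) and returning their consecutive differences; objective: alternative.

-- ===== PORT A =====
-- result[-1] += 1 on a nonempty list = replace the last element by last+1 (exact: result is never empty)
def group_sizes (grouping : List Bool) : List Int :=
  grouping.foldl
    (fun result grouped =>
      if grouped then result.dropLast ++ [result.getLastD 0 + 1]
      else result ++ [1])
    [1]

-- ===== PORT B =====
def group_sizes_alt (grouping : List Bool) : List Int :=
  let bounds : List Int :=
    [-1] ++ ((PySem.List.enumerate grouping).filter (fun p => !p.2)).map (fun p => p.1)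
         ++ [(grouping.length : Int)]
  (bounds.zip bounds.tail).map (fun p => p.2 - p.1)

-- ===== PRECONDITION & SPEC =====
def Spec_group_sizes (grouping : List Bool) (out : List Int) : Prop := out = group_sizes_alt grouping
instance (grouping : List Bool) (out : List Int) : Decidable (Spec_group_sizes grouping out) := by unfold Spec_group_sizes; infer_instance

-- ===== CLAIM (what is proved, stated in full; the proofs are below) =====
def Claim_equal_group_sizes : Prop := ∀ (grouping : List Bool), Dom_group_sizes grouping → Spec_group_sizes grouping (group_sizes grouping)

-- ===== LEMMAS AND PROOFS =====

-- canonical recursive description of the group sizes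
def pvF : List Bool → List Int
  | [] => [1]
  | true :: t => ((pvF t).headD 0 + 1) :: (pvF t).tail
  | false :: t => 1 :: pvF t

def pvIncHead (d : Int) : List Int → List Int
  | [] => []
  | a :: t => (a + d) :: t

lemma pvF_cons : ∀ l : List Bool, ∃ a t, pvF l = a :: t
  | [] => ⟨1, [], rfl⟩
  | true :: t => by
    obtain ⟨a, s, h⟩ := pvF_cons t
    exact ⟨a + 1, s, by simp [pvF, h]⟩
  | false :: t => ⟨1, pvF t, rfl⟩

-- A's loop: the accumulated list is the frozen prefix rs plus a live last element x
lemma foldA (l : List Bool) : ∀ (rs : List Int) (x : Int),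
    List.foldl
      (fun result grouped =>
        if grouped then result.dropLast ++ [result.getLastD 0 + 1]
        else result ++ [1])
      (rs ++ [x]) l
    = rs ++ pvIncHead (x - 1) (pvF l) := by
  induction l with
  | nil => intro rs x; simp [pvF, pvIncHead]
  | cons g t ih =>
    intro rs x
    cases g with
    | true =>
      obtain ⟨a, s, h⟩ := pvF_cons t
      simp only [List.foldl_cons, if_true]
      rw [List.dropLast_concat, List.getLastD_concat, ih rs (x + 1)]
      simp only [pvF, h, pvIncHead, List.headD_cons, List.tail_cons]
      congr 2
      ring
    | false =>
      obtain ⟨a, s, h⟩ := pvF_cons t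
      simp only [List.foldl_cons, Bool.false_eq_true, if_false]
      rw [ih (rs ++ [x]) 1]
      simp [pvF, h, pvIncHead]

lemma A_eq_pvF (l : List Bool) : group_sizes l = pvF l := by
  have h := foldA l [] 1
  obtain ⟨a, s, hf⟩ := pvF_cons l
  simpa [group_sizes, hf, pvIncHead] using h

-- B's boundary list, abstracted over the enumeration offset
def pvFalseIdx (l : List Bool) (s : Int) : List Int :=
  ((PySem.List.enumerate l s).filter (fun p => !p.2)).map (fun p => p.1)

lemma pvFalseIdx_nil (s : Int) : pvFalseIdx [] s = [] := by
  simp [pvFalseIdx, PySem.List.enumerate_nil]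

lemma pvFalseIdx_true (t : List Bool) (s : Int) :
    pvFalseIdx (true :: t) s = pvFalseIdx t (s + 1) := by
  simp [pvFalseIdx, PySem.List.enumerate_cons]

lemma pvFalseIdx_false (t : List Bool) (s : Int) :
    pvFalseIdx (false :: t) s = s :: pvFalseIdx t (s + 1) := by
  simp [pvFalseIdx, PySem.List.enumerate_cons]

def pvDiffs (bs : List Int) : List Int := (bs.zip bs.tail).map (fun p => p.2 - p.1)

lemma diffs_cons (a b : Int) (t : List Int) :
    pvDiffs (a :: b :: t) = (b - a) :: pvDiffs (b :: t) := by
  simp [pvDiffs]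

lemma B_main (l : List Bool) : ∀ (s e : Int), e = s + l.length →
    pvDiffs ((s - 1) :: (pvFalseIdx l s ++ [e])) = pvF l := by
  induction l with
  | nil =>
    intro s e he
    simp only [List.length_nil, Nat.cast_zero, add_zero] at he
    subst he
    simp only [pvFalseIdx_nil, List.nil_append, pvDiffs, pvF]
    norm_num
  | cons g t ih =>
    intro s e he
    have he' : e = (s + 1) + (t.length : Int) := by
      simp only [List.length_cons] at he; push_cast at he ⊢; omega
    cases g with
    | true =>
      rw [pvFalseIdx_true]
      obtain ⟨b, rest, hb⟩ :
          ∃ b rest, pvFalseIdx t (s + 1) ++ [e] = b :: rest := by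
        cases hh : pvFalseIdx t (s + 1) with
        | nil => exact ⟨e, [], by simp⟩
        | cons b r => exact ⟨b, r ++ [e], by simp⟩
      have h := ih (s + 1) e he'
      rw [hb] at h ⊢
      rw [diffs_cons] at h ⊢
      rw [pvF, ← h]
      simp only [List.headD_cons, List.tail_cons]
      congr 1
      ring
    | false =>
      rw [pvFalseIdx_false]
      simp only [List.cons_append]
      rw [diffs_cons]
      have h2 : pvDiffs (s :: (pvFalseIdx t (s + 1) ++ [e])) = pvF t := by
        have h3 := ih (s + 1) e he'
        rw [show (s + 1 : Int) - 1 = s by ring] at h3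
        exact h3
      rw [h2, pvF, show (s : Int) - (s - 1) = 1 by ring]
  
lemma B_eq_pvF (l : List Bool) : group_sizes_alt l = pvF l := by
  have h := B_main l 0 (l.length : Int) (by simp)
  simpa [group_sizes_alt, pvDiffs, pvFalseIdx, show (0 : Int) - 1 = -1 by ring] using h

-- ===== VERDICT (by name: the statement is the Claim_ definition above) =====
theorem group_sizes_spec : Claim_equal_group_sizes := by
  intro l _
  unfold Spec_group_sizes
  rw [A_eq_pvF, B_eq_pvF]
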